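-- pv_equiv track=rewrite | github.com/jgsim/algorithm-study | leetcode-contest/314/6200_The_Employee_That_Worked_on_the_Longest_Task/jgsim.py | hardestWorker
-- ===== SOURCE A (Python) =====
-- from typing import List
--
-- def hardestWorker(n: int, logs: List[List[int]]) -> int:
--     counter = [0] * n
--     prev_val = 0
--     for i in range(len(logs)):
--         counter[logs[i][0]] = max(counter[logs[i][0]], logs[i][1] - prev_val)
--         prev_val = logs[i][1]
--
--     max_id, max_val = n, -1
--     for i in range(n - 1, -1, -1):
--         if max_val <= counter[i]:
--             max_id = i
--             max_val = counter[i]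
--
--     return max_id
-- ===== SOURCE B (Python) =====
-- def hardestWorker(n, logs):
--     counter = [0] * n
--     best_dur = 0
--     best_id = 0
--     prev = 0
--     for log in logs:
--         v = max(counter[log[0]], log[1] - prev)
--         counter[log[0]] = v
--         prev = log[1]
--         if v > best_dur or (v == best_dur and log[0] < best_id):
--             best_dur = v
--             best_id = log[0]
--     return best_id
-- ===== Notes on version B (the rewrite author's own statement) =====
-- stated objective: alternative
-- what changed: B removes A's second backward argmax scan over all n employee slots: it keeps the per-employee duration table but tracks the answer (best_dur, best_id) online during the single pass over logs, breaking ties toward the smaller id as A's backward scan does.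
-- outside the precondition, e.g. on hardestWorker(2, [[-1, 5]]): A returns 1, B returns -1; on hardestWorker(-1, []): A returns -1, B returns 0
import Mathlib
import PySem

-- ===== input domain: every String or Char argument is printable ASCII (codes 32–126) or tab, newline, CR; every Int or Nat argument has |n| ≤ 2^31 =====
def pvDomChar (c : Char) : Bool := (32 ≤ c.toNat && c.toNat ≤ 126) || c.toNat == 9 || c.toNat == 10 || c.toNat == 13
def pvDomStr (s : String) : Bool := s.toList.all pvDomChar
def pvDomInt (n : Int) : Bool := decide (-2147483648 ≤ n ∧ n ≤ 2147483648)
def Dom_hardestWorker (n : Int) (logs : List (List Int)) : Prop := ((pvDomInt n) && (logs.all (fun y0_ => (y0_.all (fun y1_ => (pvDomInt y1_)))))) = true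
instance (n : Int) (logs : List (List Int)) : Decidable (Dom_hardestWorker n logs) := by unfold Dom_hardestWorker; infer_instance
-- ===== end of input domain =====

-- B drops A's second backward argmax scan over the n employee slots, tracking the running best (duration, id) online in the single pass over logs; objective: alternative (same cost, one loop fewer).


-- ===== PORT A =====
-- loop body of A's first loop: counter[logs[i][0]] = max(counter[logs[i][0]], logs[i][1] - prev_val); prev_val = logs[i][1]
def hwStepA (st : List Int × Int) (row : List Int) : List Int × Int :=
  let id := PySem.List.pyGetD row 0 0
  let leave := PySem.List.pyGetD row 1 0
  (PySem.List.pySetD st.1 id (max (PySem.List.pyGetD st.1 id 0) (leave - st.2)), leave)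

def hardestWorker (n : Int) (logs : List (List Int)) : Int :=
  let st := logs.foldl hwStepA (List.replicate n.toNat 0, 0)
  -- for i in range(n-1, -1, -1): if max_val <= counter[i]: max_id, max_val = i, counter[i]
  let fin := (PySem.List.pyRange (n - 1) (-1) (-1)).foldl
    (fun (p : Int × Int) i =>
      if p.2 ≤ PySem.List.pyGetD st.1 i 0 then (i, PySem.List.pyGetD st.1 i 0) else p)
    (n, -1)
  fin.1

-- ===== PORT B =====
-- loop body of B: v = max(counter[log[0]], log[1] - prev); counter[log[0]] = v; prev = log[1];
-- then update (best_dur, best_id) when v is strictly larger, or equal with a smaller id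
def hwStepB (s : List Int × Int × Int × Int) (row : List Int) : List Int × Int × Int × Int :=
  let id := PySem.List.pyGetD row 0 0
  let v := max (PySem.List.pyGetD s.1 id 0) (PySem.List.pyGetD row 1 0 - s.2.2.2)
  if v > s.2.1 ∨ (v = s.2.1 ∧ id < s.2.2.1)
  then (PySem.List.pySetD s.1 id v, v, id, PySem.List.pyGetD row 1 0)
  else (PySem.List.pySetD s.1 id v, s.2.1, s.2.2.1, PySem.List.pyGetD row 1 0)

def hardestWorker_alt (n : Int) (logs : List (List Int)) : Int :=
  (logs.foldl hwStepB (List.replicate n.toNat 0, 0, 0, 0)).2.2.1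

-- ===== PRECONDITION & SPEC =====
-- Pre_ restricts to the task's natural domain: 0 ≤ n and every log row has ≥ 2 entries with employee id in [0, n).
-- A raises IndexError on rows shorter than 2 and on ids outside [-n, n); it does RETURN on negative n with empty logs
-- (returning n itself) and on negative in-range ids (crediting the task to employee n+id via negative-index wraparound) —
-- both are accidents of A's array indexing on malformed input, excluded here (see cites).
def Pre_hardestWorker (n : Int) (logs : List (List Int)) : Prop :=
  0 ≤ n ∧ ∀ row ∈ logs, 2 ≤ row.length ∧ 0 ≤ row.getD 0 0 ∧ row.getD 0 0 < n
instance (n : Int) (logs : List (List Int)) : Decidable (Pre_hardestWorker n logs) := by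
  unfold Pre_hardestWorker; infer_instance

def pvWitness_hardestWorker : Int × List (List Int) := (2, [[0, 3], [1, 5], [0, 9]])

def Spec_hardestWorker (n : Int) (logs : List (List Int)) (out : Int) : Prop := out = hardestWorker_alt n logs
instance (n : Int) (logs : List (List Int)) (out : Int) : Decidable (Spec_hardestWorker n logs out) := by unfold Spec_hardestWorker; infer_instance

-- ===== CLAIM (what is proved, stated in full; the proofs are below) =====
def Claim_equal_hardestWorker : Prop := ∀ (n : Int) (logs : List (List Int)), Dom_hardestWorker n logs → Pre_hardestWorker n logs → Spec_hardestWorker n logs (hardestWorker n logs)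

-- ===== LEMMAS AND PROOFS =====

-- invariant tying A's counter list to B's running best (bd, bi), for n >= 1
def hwInv (n : Int) (c : List Int) (bd bi : Int) : Prop :=
  c.length = n.toNat ∧ 0 ≤ bd ∧ 0 ≤ bi ∧ bi < n ∧
  (∀ i : Int, 0 ≤ i → i < n → PySem.List.pyGetD c i 0 ≤ bd) ∧
  PySem.List.pyGetD c bi 0 = bd ∧
  (∀ i : Int, 0 ≤ i → i < bi → PySem.List.pyGetD c i 0 < bd)

lemma hwC_pySetD (c : List Int) (i j v : Int) (hi0 : 0 ≤ i) (hi : i.toNat < c.length)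
    (hj0 : 0 ≤ j) (hj : j.toNat < c.length) :
    PySem.List.pyGetD (PySem.List.pySetD c i v) j 0 = if j = i then v else PySem.List.pyGetD c j 0 := by
  rw [PySem.List.pySetD_of_nonneg c v hi0]
  rw [PySem.List.pyGetD_eq_getElem _ 0 hj0 (by simp only [List.length_set]; omega)]
  rw [List.getElem_set]
  by_cases h : j = i
  · have hn : i.toNat = j.toNat := by omega
    simp [h, hn]
  · have hne : i.toNat ≠ j.toNat := by omega
    rw [if_neg hne, if_neg h, PySem.List.pyGetD_eq_getElem c 0 hj0 (by omega)]

lemma hwC_replicate (m : Nat) (i : Int) (h0 : 0 ≤ i) (h : i.toNat < m) :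
    PySem.List.pyGetD (List.replicate m (0 : Int)) i 0 = 0 := by
  rw [PySem.List.pyGetD_eq_getElem _ 0 h0 (by simp only [List.length_replicate]; omega)]
  simp

-- one step: the two counters stay equal, prev stays aligned, and the invariant is preserved
lemma hwInv_step (n : Int) (c : List Int) (bd bi prev : Int) (row : List Int)
    (hrow : 2 ≤ row.length ∧ 0 ≤ row.getD 0 0 ∧ row.getD 0 0 < n)
    (hInv : hwInv n c bd bi) :
    hwInv n (hwStepA (c, prev) row).1 (hwStepB (c, bd, bi, prev) row).2.1
        (hwStepB (c, bd, bi, prev) row).2.2.1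
      ∧ (hwStepA (c, prev) row).1 = (hwStepB (c, bd, bi, prev) row).1
      ∧ (hwStepA (c, prev) row).2 = (hwStepB (c, bd, bi, prev) row).2.2.2 := by
  obtain ⟨hlen, hbd0, hbi0, hbin, hall, hbiv, hmin⟩ := hInv
  obtain ⟨hL, hid0', hidn'⟩ := hrow
  have hID : PySem.List.pyGetD row 0 0 = row.getD 0 0 := PySem.List.pyGetD_zero row 0
  have hid0 : 0 ≤ PySem.List.pyGetD row 0 0 := by rw [hID]; exact hid0'
  have hidn : PySem.List.pyGetD row 0 0 < n := by rw [hID]; exact hidn'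
  have hceq : (hwStepA (c, prev) row).1 = (hwStepB (c, bd, bi, prev) row).1 := by
    simp only [hwStepA, hwStepB]; split <;> rfl
  have hprevB : (hwStepB (c, bd, bi, prev) row).2.2.2 = PySem.List.pyGetD row 1 0 := by
    simp only [hwStepB]; split <;> rfl
  have hprev : (hwStepA (c, prev) row).2 = (hwStepB (c, bd, bi, prev) row).2.2.2 := by
    rw [hprevB]; rfl
  refine ⟨?_, hceq, hprev⟩
  have hCnew : ∀ j : Int, 0 ≤ j → j < n →
      PySem.List.pyGetD (hwStepA (c, prev) row).1 j 0
        = if j = PySem.List.pyGetD row 0 0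
          then max (PySem.List.pyGetD c (PySem.List.pyGetD row 0 0) 0) (PySem.List.pyGetD row 1 0 - prev)
          else PySem.List.pyGetD c j 0 := by
    intro j hj0 hjn
    exact hwC_pySetD c _ j _ hid0 (by omega) hj0 (by omega)
  have hlenA : (hwStepA (c, prev) row).1.length = n.toNat := by
    show (PySem.List.pySetD c _ _).length = n.toNat
    rw [PySem.List.pySetD_of_nonneg c _ hid0]
    simp only [List.length_set]; exact hlen
  by_cases hcase : max (PySem.List.pyGetD c (PySem.List.pyGetD row 0 0) 0)
        (PySem.List.pyGetD row 1 0 - prev) > bd ∨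
      (max (PySem.List.pyGetD c (PySem.List.pyGetD row 0 0) 0)
        (PySem.List.pyGetD row 1 0 - prev) = bd ∧ PySem.List.pyGetD row 0 0 < bi)
  · -- B updates to (v, id)
    have hB1 : (hwStepB (c, bd, bi, prev) row).2.1
        = max (PySem.List.pyGetD c (PySem.List.pyGetD row 0 0) 0) (PySem.List.pyGetD row 1 0 - prev) := by
      simp only [hwStepB]; rw [if_pos hcase]
    have hB2 : (hwStepB (c, bd, bi, prev) row).2.2.1 = PySem.List.pyGetD row 0 0 := by
      simp only [hwStepB]; rw [if_pos hcase]
    rw [hB1, hB2]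
    have hbdv : bd ≤ max (PySem.List.pyGetD c (PySem.List.pyGetD row 0 0) 0) (PySem.List.pyGetD row 1 0 - prev) := by
      rcases hcase with h | ⟨h, _⟩
      · exact le_of_lt h
      · exact le_of_eq h.symm
    refine ⟨hlenA, by omega, hid0, hidn, ?_, ?_, ?_⟩
    · intro i hi0 hin
      rw [hCnew i hi0 hin]
      split
      · exact le_refl _
      · have := hall i hi0 hin; omega
    · rw [hCnew _ hid0 hidn, if_pos rfl]
    · intro i hi0 hii
      rw [hCnew i hi0 (by omega), if_neg (by omega)]
      rcases hcase with h | ⟨h, hlt⟩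
      · have := hall i hi0 (by omega); omega
      · have := hmin i hi0 (by omega); omega
  · -- B keeps (bd, bi)
    have hB1 : (hwStepB (c, bd, bi, prev) row).2.1 = bd := by
      simp only [hwStepB]; rw [if_neg hcase]
    have hB2 : (hwStepB (c, bd, bi, prev) row).2.2.1 = bi := by
      simp only [hwStepB]; rw [if_neg hcase]
    rw [hB1, hB2]
    have hc1 : max (PySem.List.pyGetD c (PySem.List.pyGetD row 0 0) 0) (PySem.List.pyGetD row 1 0 - prev) ≤ bd :=
      not_lt.mp (fun h => hcase (Or.inl h))
    have hc2 : max (PySem.List.pyGetD c (PySem.List.pyGetD row 0 0) 0) (PySem.List.pyGetD row 1 0 - prev) = bd →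
        bi ≤ PySem.List.pyGetD row 0 0 :=
      fun he => not_lt.mp (fun hl => hcase (Or.inr ⟨he, hl⟩))
    refine ⟨hlenA, hbd0, hbi0, hbin, ?_, ?_, ?_⟩
    · intro i hi0 hin
      rw [hCnew i hi0 hin]
      split
      · exact hc1
      · exact hall i hi0 hin
    · rw [hCnew bi hbi0 hbin]
      by_cases h : bi = PySem.List.pyGetD row 0 0
      · rw [if_pos h]
        have hge : bd ≤ max (PySem.List.pyGetD c (PySem.List.pyGetD row 0 0) 0) (PySem.List.pyGetD row 1 0 - prev) := by
          rw [← h, ← hbiv]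
          exact le_max_left _ _
        omega
      · rw [if_neg h]; exact hbiv
    · intro i hi0 hii
      rw [hCnew i hi0 (by omega)]
      have hci := hmin i hi0 hii
      split
      · rename_i h
        by_cases hv : max (PySem.List.pyGetD c (PySem.List.pyGetD row 0 0) 0) (PySem.List.pyGetD row 1 0 - prev) = bd
        · exfalso; have := hc2 hv; omega
        · omega
      · exact hci

-- the whole first loop: counters equal, prev aligned, invariant preserved
lemma hwInv_loop (n : Int) (logs : List (List Int)) :
    ∀ (c : List Int) (bd bi prev : Int),
    (∀ row ∈ logs, 2 ≤ row.length ∧ 0 ≤ row.getD 0 0 ∧ row.getD 0 0 < n) →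
    hwInv n c bd bi →
    hwInv n (logs.foldl hwStepA (c, prev)).1
      (logs.foldl hwStepB (c, bd, bi, prev)).2.1 (logs.foldl hwStepB (c, bd, bi, prev)).2.2.1 := by
  induction logs with
  | nil => intro c bd bi prev _ hInv; simpa using hInv
  | cons row rest ih =>
    intro c bd bi prev hrows hInv
    have hrow := hrows row (List.mem_cons_self ..)
    obtain ⟨hInv', hceq, hprev⟩ := hwInv_step n c bd bi prev row hrow hInv
    simp only [List.foldl_cons]
    have h1 : hwStepA (c, prev) row = ((hwStepA (c, prev) row).1, (hwStepA (c, prev) row).2) := rfl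
    have h2 : hwStepB (c, bd, bi, prev) row
        = ((hwStepB (c, bd, bi, prev) row).1, (hwStepB (c, bd, bi, prev) row).2.1,
           (hwStepB (c, bd, bi, prev) row).2.2.1, (hwStepB (c, bd, bi, prev) row).2.2.2) := rfl
    rw [h1, h2, ← hceq, ← hprev]
    exact ih _ _ _ _ (fun r hr => hrows r (List.mem_cons_of_mem _ hr)) hInv'

-- phase 2 of the backward scan: once the best (bi, bd) is installed, all indices below bi stay silent
lemma hwScan_phase2 (c : List Int) (bd bi : Int)
    (hmin : ∀ i : Int, 0 ≤ i → i < bi → PySem.List.pyGetD c i 0 < bd) :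
    ∀ (k : Nat) (a : Int), a < bi → a - (-1) ≤ (k : Int) →
    (PySem.List.pyRange a (-1) (-1)).foldl
      (fun (p : Int × Int) i => if p.2 ≤ PySem.List.pyGetD c i 0 then (i, PySem.List.pyGetD c i 0) else p) (bi, bd) = (bi, bd) := by
  intro k
  induction k with
  | zero =>
    intro a _ hk
    rw [PySem.List.pyRange_neg_one_eq_nil (by omega)]
    rfl
  | succ m ih =>
    intro a ha hk
    by_cases hnil : a ≤ -1
    · rw [PySem.List.pyRange_neg_one_eq_nil hnil]; rfl
    · rw [PySem.List.pyRange_neg_one_cons (by omega)]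
      simp only [List.foldl_cons]
      rw [if_neg (by have := hmin a (by omega) ha; omega)]
      exact ih (a - 1) (by omega) (by omega)

-- phase 1: scanning down from a ≥ bi with any accumulator value ≤ bd ends at bi
lemma hwScan_phase1 (c : List Int) (n bd bi : Int)
    (hbi0 : 0 ≤ bi) (hall : ∀ i : Int, 0 ≤ i → i < n → PySem.List.pyGetD c i 0 ≤ bd)
    (hbiv : PySem.List.pyGetD c bi 0 = bd) (hmin : ∀ i : Int, 0 ≤ i → i < bi → PySem.List.pyGetD c i 0 < bd) :
    ∀ (k : Nat) (a : Int) (acc : Int × Int), bi ≤ a → a < n → a - bi ≤ (k : Int) → acc.2 ≤ bd →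
    ((PySem.List.pyRange a (-1) (-1)).foldl
      (fun (p : Int × Int) i => if p.2 ≤ PySem.List.pyGetD c i 0 then (i, PySem.List.pyGetD c i 0) else p) acc).1 = bi := by
  intro k
  induction k with
  | zero =>
    intro a acc hba han hk hacc
    have ha : a = bi := by omega
    subst ha
    rw [PySem.List.pyRange_neg_one_cons (by omega)]
    simp only [List.foldl_cons]
    rw [if_pos (by rw [hbiv]; exact hacc), hbiv]
    rw [hwScan_phase2 c bd a hmin (a - 1 - (-1)).toNat (a - 1) (by omega) (by omega)]
  | succ m ih =>
    intro a acc hba han hk hacc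
    by_cases ha : a = bi
    · subst ha
      rw [PySem.List.pyRange_neg_one_cons (by omega)]
      simp only [List.foldl_cons]
      rw [if_pos (by rw [hbiv]; exact hacc), hbiv]
      rw [hwScan_phase2 c bd a hmin (a - 1 - (-1)).toNat (a - 1) (by omega) (by omega)]
    · rw [PySem.List.pyRange_neg_one_cons (by omega)]
      simp only [List.foldl_cons]
      by_cases hfire : acc.2 ≤ PySem.List.pyGetD c a 0
      · rw [if_pos hfire]
        exact ih (a - 1) _ (by omega) (by omega) (by omega)
          (by simpa using hall a (by omega) han)
      · rw [if_neg hfire]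
        exact ih (a - 1) acc (by omega) (by omega) (by omega) hacc

-- ===== VERDICT (by name: the statement is the Claim_ definition above) =====
theorem hardestWorker_spec : Claim_equal_hardestWorker := by
  intro n logs _ hPre
  obtain ⟨hn0, hrows⟩ := hPre
  unfold Spec_hardestWorker hardestWorker hardestWorker_alt
  by_cases hn : n = 0
  · -- Pre forces logs = [] when n = 0, and both sides return 0
    subst hn
    have hlogs : logs = [] := by
      cases logs with
      | nil => rfl
      | cons row rest =>
        exfalso
        have := hrows row (List.mem_cons_self ..)
        omega
    subst hlogs
    simp
  · -- n ≥ 1: run the invariant through the loop, then read the scan off it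
    have hInv0 : hwInv n (List.replicate n.toNat (0 : Int)) 0 0 := by
      refine ⟨by simp, le_refl 0, le_refl 0, by omega, ?_, ?_, ?_⟩
      · intro i hi0 hin
        rw [hwC_replicate n.toNat i hi0 (by omega)]
      · rw [hwC_replicate n.toNat 0 (by omega) (by omega)]
      · intro i hi0 hii; omega
    have hInv := hwInv_loop n logs (List.replicate n.toNat 0) 0 0 0 hrows hInv0
    obtain ⟨hlen, hbd0, hbi0, hbin, hall, hbiv, hmin⟩ := hInv
    exact hwScan_phase1 (logs.foldl hwStepA (List.replicate n.toNat 0, 0)).1 n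
      (logs.foldl hwStepB (List.replicate n.toNat 0, 0, 0, 0)).2.1
      (logs.foldl hwStepB (List.replicate n.toNat 0, 0, 0, 0)).2.2.1
      hbi0 hall hbiv hmin
      (n - 1 - (logs.foldl hwStepB (List.replicate n.toNat 0, 0, 0, 0)).2.2.1).toNat (n - 1) (n, -1)
      (by omega) (by omega) (by omega) (by omega)
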